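-- pv_equiv track=rewrite | github.com/SherMM/rosalind-python | frequency.py | commonKmer
-- ===== SOURCE A (Python) =====
-- def commonKmer(data,k):
-- 	kmers = {}
-- 	for i in range(len(data)):
-- 		strand = data[i:]
-- 		kmer = strand[:k]
-- 		if kmer not in kmers:
-- 			kmer_freq = strand.count(kmer)
-- 			kmers[kmer_freq] = kmers.get(kmer_freq,[]) + [kmer]
--
-- 	commonKmer = max(kmers.keys())
-- 	return kmers[commonKmer]
-- ===== SOURCE B (Python) =====
-- def _bisect_left(a, x):
--     lo, hi = 0, len(a)
--     while lo < hi: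
--         mid = (lo + hi) // 2
--         if a[mid] < x:
--             lo = mid + 1
--         else:
--             hi = mid
--     return lo
--
--
-- def commonKmer(data, k):
--     n = len(data)
--     kmers = [data[i:i + k] for i in range(n)]
--     # group query positions by their k-mer
--     groups = {}
--     for i in range(n):
--         groups.setdefault(kmers[i], []).append(i)
--     counts = [0] * n
--     for w, qs in groups.items():
--         # all match positions of w in data, one find-scan
--         occ = []
--         p = data.find(w)
--         while p >= 0:
--             occ.append(p)
--             p = data.find(w, p + 1)
--         m = len(occ)
--         # greedy non-overlapping count starting at occurrence t, back to front
--         cnt_at = [0] * (m + 1)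
--         for t in range(m - 1, -1, -1):
--             cnt_at[t] = 1 + cnt_at[_bisect_left(occ, occ[t] + len(w))]
--         for i in qs:
--             counts[i] = cnt_at[_bisect_left(occ, i)]
--     best = max(counts)
--     return [kmers[i] for i in range(n) if counts[i] == best]
-- ===== Notes on version B (the rewrite author's own statement) =====
-- stated objective: alternative
-- what changed: B replaces A's per-suffix strand.count rescans and the frequency-keyed dict/max/lookup by grouping positions per k-mer, finding each distinct k-mer's occurrence list with one find-scan, precomputing greedy non-overlapping counts back-to-front, answering each position by binary search, and a final max+filter pass; Pre_ restricts to the task's natural domain (nonempty data, k >= 1): A raises ValueError on empty data, and for k <= 0 every slice data[i:][:k] degenerates to an empty or negative-length 'k-mer', not a k-mer at all.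
-- outside the precondition, e.g. on commonKmer('ABAB', 0): A returns [''], B returns ['', '', '', '']
import Mathlib
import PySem

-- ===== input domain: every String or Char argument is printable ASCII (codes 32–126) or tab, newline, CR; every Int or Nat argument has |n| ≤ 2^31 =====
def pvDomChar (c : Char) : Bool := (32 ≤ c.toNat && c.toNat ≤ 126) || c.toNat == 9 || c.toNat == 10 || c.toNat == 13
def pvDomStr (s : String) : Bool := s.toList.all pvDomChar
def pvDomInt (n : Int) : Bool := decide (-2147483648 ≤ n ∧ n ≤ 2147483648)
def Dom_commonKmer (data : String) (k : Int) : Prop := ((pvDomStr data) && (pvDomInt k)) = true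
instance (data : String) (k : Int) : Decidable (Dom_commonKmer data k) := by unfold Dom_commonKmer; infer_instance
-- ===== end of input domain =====

-- B groups positions by k-mer, scans each distinct k-mer's occurrences once, precomputes greedy
-- non-overlapping counts back-to-front and answers each position by binary search (alternative
-- algorithm; A rescans the whole suffix for every position).

-- ===== PORT A =====
def commonKmer (data : String) (k : Int) : List String :=
  let s := data.toList
  let kmers : PySem.Dict Int (List String) :=
    (PySem.List.pyRange 0 (PySem.List.len s) 1).foldl
      (fun d i =>
        let strand := PySem.List.slice s (some i) none
        let kmer := PySem.List.slice strand none (some k)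
        -- Python's guard 'if kmer not in kmers' compares the str kmer with the dict's int keys
        -- (kmers is keyed by frequencies), so it is always True; ported unconditionally (exact).
        let kmer_freq : Int := (PySem.Chars.count strand kmer : Int)
        d.insert kmer_freq (d.getD kmer_freq [] ++ [String.ofList kmer]))
      PySem.Dict.empty
  match PySem.List.max? kmers.keys (fun x => x) with
  | some m => kmers.getD m []
  | none => []   -- Python: max() of the empty key list raises ValueError; excluded by Pre_

-- ===== PORT B =====
-- B: the k-mer starting at position i (data[i:i+k])
def kmerAt_alt (s : List Char) (k : Int) (i : Nat) : List Char :=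
  PySem.List.slice s (some (i : Int)) (some ((i : Int) + k))

-- B: the find-scan 'p = data.find(w); while p >= 0: occ.append(p); p = data.find(w, p + 1)';
-- the fuel |s|+1 bounds the number of iterations (each found position is strictly larger)
def occScan_alt (s w : List Char) : Nat → Int → List Int → List Int
  | 0, _, occ => occ
  | fuel + 1, p, occ =>
    if 0 ≤ p then occScan_alt s w fuel (PySem.Chars.findFrom s w (p + 1) none) (occ ++ [p])
    else occ

-- B: the backward loop 'for t in range(m-1, -1, -1): cnt_at[t] = 1 + cnt_at[bisect(occ, occ[t]+len(w))]'
-- (hand-written _bisect_left in Source B is exactly bisect.bisect_left = PySem.List.bisectLeft)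
def buildCnt_alt (occ : List Int) (wlen : Nat) : Nat → List Int → List Int
  | 0, cnt => cnt
  | t + 1, cnt =>
    buildCnt_alt occ wlen t
      (cnt.set t (1 + cnt.getD (PySem.List.bisectLeft occ (occ.getD t 0 + (wlen : Int))) 0))

def commonKmer_alt (data : String) (k : Int) : List String :=
  let s := data.toList
  let n := s.length
  let kmers := (List.range n).map (kmerAt_alt s k)
  let groups : PySem.Dict (List Char) (List Nat) :=
    (List.range n).foldl
      (fun d i => d.insert (kmers.getD i []) (d.getD (kmers.getD i []) [] ++ [i]))
      PySem.Dict.empty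
  let counts : List Int :=
    groups.items.foldl
      (fun counts wqs =>
        let occ := occScan_alt s wqs.1 (n + 1) (PySem.Chars.find s wqs.1) []
        let cntAt := buildCnt_alt occ wqs.1.length occ.length (List.replicate (occ.length + 1) 0)
        wqs.2.foldl (fun c i => c.set i (cntAt.getD (PySem.List.bisectLeft occ (i : Int)) 0)) counts)
      (List.replicate n 0)
  match PySem.List.max? counts (fun x => x) with
  | some best => ((List.range n).filter (fun i => counts.getD i 0 = best)).map
      (fun i => String.ofList (kmers.getD i []))
  | none => []   -- Python: max([]) raises ValueError; excluded by Pre_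

-- ===== PRECONDITION & SPEC =====
-- Pre_ is the task's natural domain. On data = "" both Pythons raise ValueError (max() of an
-- empty sequence). For k ≤ 0 A still returns a value, but every slice data[i:][:k] is then an
-- empty or negative-length 'k-mer', not a k-mer at all, so those inputs are excluded as outside
-- the k-mer task's domain (cites in claim.json show A's and B's values on one such input).
def Pre_commonKmer (data : String) (k : Int) : Prop := data ≠ "" ∧ 1 ≤ k
instance (data : String) (k : Int) : Decidable (Pre_commonKmer data k) := by unfold Pre_commonKmer; infer_instance
def pvWitness_commonKmer : String × Int := ("ABAB", 2)

def Spec_commonKmer (data : String) (k : Int) (out : List String) : Prop := out = commonKmer_alt data k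
instance (data : String) (k : Int) (out : List String) : Decidable (Spec_commonKmer data k out) := by unfold Spec_commonKmer; infer_instance

-- ===== CLAIM (what is proved, stated in full; the proofs are below) =====
def Claim_equal_commonKmer : Prop := ∀ (data : String) (k : Int), Dom_commonKmer data k → Pre_commonKmer data k → Spec_commonKmer data k (commonKmer data k)

-- ===== LEMMAS AND PROOFS =====

-- acc shift
theorem pvGoAcc (w : List Char) : ∀ (fuel : Nat) (l : List Char) (acc : Nat),
    PySem.Chars.count.go w fuel l acc = acc + PySem.Chars.count.go w fuel l 0 := by
  intro fuel
  induction fuel with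
  | zero => intro l acc; simp [PySem.Chars.count.go]
  | succ f ih =>
    intro l acc
    cases l with
    | nil => simp [PySem.Chars.count.go]
    | cons h t =>
      simp only [PySem.Chars.count.go]
      split
      · rw [ih _ (acc+1), ih _ 1]; omega
      · exact ih _ acc

-- fuel irrelevance (fuel ≥ length)
theorem pvGoFuel (w : List Char) (hw : w ≠ []) : ∀ (N : Nat) (l : List Char) (f₁ f₂ : Nat),
    l.length ≤ N → l.length ≤ f₁ → l.length ≤ f₂ →
    PySem.Chars.count.go w f₁ l 0 = PySem.Chars.count.go w f₂ l 0 := by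
  intro N
  induction N with
  | zero =>
    intro l f₁ f₂ hN _ _
    have : l = [] := List.length_eq_zero_iff.mp (Nat.le_zero.mp hN)
    subst this
    cases f₁ <;> cases f₂ <;> simp [PySem.Chars.count.go]
  | succ N ih =>
    intro l f₁ f₂ hN h₁ h₂
    cases l with
    | nil => cases f₁ <;> cases f₂ <;> simp [PySem.Chars.count.go]
    | cons h t =>
      obtain ⟨g₁, rfl⟩ : ∃ g, f₁ = g + 1 := ⟨f₁ - 1, by simp at h₁ ⊢; omega⟩
      obtain ⟨g₂, rfl⟩ : ∃ g, f₂ = g + 1 := ⟨f₂ - 1, by simp at h₂ ⊢; omega⟩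
      simp only [PySem.Chars.count.go]
      split
      · rename_i hp
        have hwlen : 1 ≤ w.length := by
          cases w with | nil => exact absurd rfl hw | cons a b => simp
        rw [pvGoAcc w g₁, pvGoAcc w g₂]
        congr 1
        apply ih <;> simp at hN h₁ h₂ ⊢ <;> omega
      · apply ih <;> simp at hN h₁ h₂ ⊢ <;> omega

theorem pvCountEqGo (w l : List Char) (hw : w ≠ []) :
    PySem.Chars.count l w = PySem.Chars.count.go w l.length l 0 := by
  simp [PySem.Chars.count, List.isEmpty_iff, hw]

theorem pvCountConsPrefix (w : List Char) (hw : w ≠ []) (h : Char) (t : List Char)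
    (hp : w <+: (h :: t)) :
    PySem.Chars.count (h :: t) w = 1 + PySem.Chars.count (List.drop w.length (h :: t)) w := by
  have hwlen : 1 ≤ w.length := by cases w with | nil => exact absurd rfl hw | cons a b => simp
  have hwle : w.length ≤ t.length + 1 := by simpa using hp.length_le
  rw [pvCountEqGo w _ hw, pvCountEqGo w _ hw]
  simp only [List.length_cons, PySem.Chars.count.go, List.isPrefixOf_iff_prefix.mpr hp,
    if_true, Nat.zero_add]
  rw [pvGoAcc w t.length]
  congr 1
  apply pvGoFuel w hw (t.length) <;> simp <;> omega

theorem pvCountConsNotPrefix (w : List Char) (hw : w ≠ []) (h : Char) (t : List Char)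
    (hp : ¬ w <+: (h :: t)) :
    PySem.Chars.count (h :: t) w = PySem.Chars.count t w := by
  rw [pvCountEqGo w _ hw, pvCountEqGo w _ hw]
  simp only [List.length_cons, PySem.Chars.count.go]
  rw [if_neg (by simp [List.isPrefixOf_iff_prefix]; exact hp)]

-- find l w = j when j is the first position with a prefix match
theorem pvFindEq (l w : List Char) (j : Nat) (hj : w <+: l.drop j)
    (hmin : ∀ i < j, ¬ w <+: l.drop i) : PySem.Chars.find l w = j := by
  have hinf : w <:+: l :=
    List.infix_iff_prefix_suffix.mpr ⟨l.drop j, hj, List.drop_suffix j l⟩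
  have h0 : 0 ≤ PySem.Chars.find l w := (PySem.Chars.find_nonneg_iff l w).mpr hinf
  obtain ⟨hpref, hminf⟩ := PySem.Chars.find_spec h0
  have : (PySem.Chars.find l w).toNat = j := by
    rcases Nat.lt_trichotomy (PySem.Chars.find l w).toNat j with h | h | h
    · exact absurd hpref (hmin _ h)
    · exact h
    · exact absurd hj (hminf j h)
  omega

theorem pvFindPrefixZero (l w : List Char) (hp : w <+: l) : PySem.Chars.find l w = 0 := by
  apply pvFindEq l w 0 (by simpa using hp)
  intro i hi
  omega

-- no prefix match at any drop ⟹ find = -1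
theorem pvFindNone (l w : List Char) (hnone : ∀ i : Nat, ¬ w <+: l.drop i) :
    PySem.Chars.find l w = -1 := by
  rw [PySem.Chars.find_eq_neg_one_iff]
  intro hinf
  obtain ⟨t, hpt, hts⟩ := List.infix_iff_prefix_suffix.mp hinf
  have hi : t = l.drop (l.length - t.length) := List.suffix_iff_eq_drop.mp hts
  exact hnone (l.length - t.length) (hi ▸ hpt)

-- the unrolling of count through the first match
theorem pvCountUnroll (w : List Char) (hw : w ≠ []) : ∀ (l : List Char),
    PySem.Chars.count l w =
      if PySem.Chars.find l w = -1 then 0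
      else 1 + PySem.Chars.count (l.drop ((PySem.Chars.find l w).toNat + w.length)) w := by
  intro l
  induction l with
  | nil =>
    rw [pvFindNone [] w (by intro i; simp [List.prefix_nil]; exact hw)]
    simp [pvCountEqGo w [] hw, PySem.Chars.count.go]
  | cons h t ih =>
    by_cases hp : w <+: (h :: t)
    · rw [pvFindPrefixZero _ w hp]
      rw [pvCountConsPrefix w hw h t hp]
      simp
    · rw [pvCountConsNotPrefix w hw h t hp]
      by_cases hft : PySem.Chars.find t w = -1
      · have : PySem.Chars.find (h :: t) w = -1 := by
          rw [PySem.Chars.find_eq_neg_one_iff] at hft ⊢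
          rw [List.infix_cons_iff]
          push Not
          exact ⟨hp, hft⟩
        rw [if_pos this]
        rw [ih, if_pos hft]
      · -- find t w ≥ 0; find (h::t) w = find t w + 1
        have h0 : 0 ≤ PySem.Chars.find t w := by
          have := PySem.Chars.neg_one_le_find t w
          omega
        obtain ⟨hpref, hminf⟩ := PySem.Chars.find_spec h0
        have hfind : PySem.Chars.find (h :: t) w = ((PySem.Chars.find t w).toNat + 1 : Nat) := by
          apply pvFindEq
          · simpa using hpref
          · intro i hi
            match i with
            | 0 => simpa using hp
            | (i+1) =>
              simp only [List.drop_succ_cons]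
              exact hminf i (by omega)
        rw [hfind]
        rw [if_neg (by omega), ih, if_neg hft]
        have : ((((PySem.Chars.find t w).toNat + 1 : Nat) : Int)).toNat = (PySem.Chars.find t w).toNat + 1 := by omega
        rw [this]
        simp [Nat.add_right_comm]

-- count over a suffix with no match at all is 0
theorem pvCountNone (s w : List Char) (hw : w ≠ []) (j : Nat)
    (hnone : ∀ p : Nat, j ≤ p → ¬ w <+: s.drop p) :
    PySem.Chars.count (s.drop j) w = 0 := by
  rw [pvCountUnroll w hw, if_pos]
  apply pvFindNone
  intro i
  rw [List.drop_drop]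
  exact hnone (j + i) (by omega)

-- count over a suffix equals count from the first match at or after it
theorem pvCountFirst (s w : List Char) (hw : w ≠ []) (j q : Nat)
    (hq : w <+: s.drop q) (hjq : j ≤ q)
    (hmin : ∀ p : Nat, j ≤ p → p < q → ¬ w <+: s.drop p) :
    PySem.Chars.count (s.drop j) w = PySem.Chars.count (s.drop q) w := by
  have hfind : PySem.Chars.find (s.drop j) w = (q - j : Nat) := by
    apply pvFindEq
    · rw [List.drop_drop]
      rw [show j + (q - j) = q by omega]
      exact hq
    · intro i hi
      rw [List.drop_drop]
      exact hmin (j + i) (by omega) (by omega)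
  rw [pvCountUnroll w hw (s.drop j), hfind, if_neg (by omega)]
  rw [pvCountUnroll w hw (s.drop q), pvFindPrefixZero _ w hq, if_neg (by omega)]
  rw [List.drop_drop, List.drop_drop]
  simp only [Int.toNat_natCast, Int.toNat_zero]
  rw [show j + (q - j + w.length) = q + (0 + w.length) by omega]

theorem pvFindDropNonneg (s w : List Char) (a : Nat) (h : 0 ≤ PySem.Chars.find (s.drop a) w)
    (hw : w ≠ []) : a + (PySem.Chars.find (s.drop a) w).toNat + w.length ≤ s.length := by
  obtain ⟨hpref, -⟩ := PySem.Chars.find_spec h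
  rw [List.drop_drop] at hpref
  have := hpref.length_le
  simp at this
  have hwlen : 1 ≤ w.length := by cases w with | nil => exact absurd rfl hw | cons x y => simp
  omega

-- the list of ALL match positions at or after a, in increasing order
def pvMatchesFrom (s w : List Char) (a : Nat) : List Int :=
  if h : 0 ≤ PySem.Chars.find (s.drop a) w ∧ w ≠ [] then
    (↑(a + (PySem.Chars.find (s.drop a) w).toNat)) ::
      pvMatchesFrom s w (a + (PySem.Chars.find (s.drop a) w).toNat + 1)
  else []
termination_by s.length - a
decreasing_by
  have := pvFindDropNonneg s w a h.1 h.2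
  have hwlen : 1 ≤ w.length := by
    cases w with
    | nil => exact absurd rfl h.2
    | cons x y => simp
  omega

theorem pvMF_mem (s w : List Char) : ∀ (a : Nat), ∀ q ∈ pvMatchesFrom s w a,
    ∃ p : Nat, q = ↑p ∧ a ≤ p ∧ w <+: s.drop p := by
  intro a
  fun_induction pvMatchesFrom s w a with
  | case1 a h ih =>
    intro q hq
    obtain ⟨hf, hw⟩ := h
    obtain ⟨hpref, -⟩ := PySem.Chars.find_spec hf
    rw [List.drop_drop] at hpref
    rcases List.mem_cons.mp hq with rfl | hq
    · exact ⟨a + (PySem.Chars.find (s.drop a) w).toNat, rfl, by omega, hpref⟩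
    · obtain ⟨p, rfl, hp1, hp2⟩ := ih q hq
      exact ⟨p, rfl, by omega, hp2⟩
  | case2 => intro q hq; exact absurd hq (List.not_mem_nil)

theorem pvMF_complete (s w : List Char) (hw : w ≠ []) : ∀ (a : Nat) (p : Nat), a ≤ p →
    w <+: s.drop p → (↑p : Int) ∈ pvMatchesFrom s w a := by
  intro a
  fun_induction pvMatchesFrom s w a with
  | case1 a h ih =>
    intro p hap hp
    obtain ⟨hf, -⟩ := h
    obtain ⟨-, hmin⟩ := PySem.Chars.find_spec hf
    set f := (PySem.Chars.find (s.drop a) w).toNat with hfdef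
    rcases Nat.lt_trichotomy p (a + f) with hlt | heq | hgt
    · exfalso
      have := hmin (p - a) (by omega)
      rw [List.drop_drop] at this
      rw [show a + (p - a) = p by omega] at this
      exact this hp
    · subst heq; exact List.mem_cons_self
    · exact List.mem_cons_of_mem _ (ih p (by omega) hp)
  | case2 a h =>
    intro p hap hp
    exfalso
    rcases Decidable.not_and_iff_not_or_not.mp h with hf | hw'
    · have hdd : (s.drop a).drop (p - a) = s.drop p := by
        rw [List.drop_drop]; congr 1; omega
      have : w <:+: s.drop a :=
        List.infix_iff_prefix_suffix.mpr ⟨(s.drop a).drop (p - a), by rw [hdd]; exact hp,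
          List.drop_suffix _ _⟩
      have := (PySem.Chars.find_nonneg_iff (s.drop a) w).mpr this
      omega
    · exact hw' hw

theorem pvMF_sorted (s w : List Char) : ∀ (a : Nat), (pvMatchesFrom s w a).Pairwise (· < ·) := by
  intro a
  fun_induction pvMatchesFrom s w a with
  | case1 a h ih =>
    refine List.pairwise_cons.mpr ⟨?_, ih⟩
    intro q hq
    obtain ⟨p, rfl, hp1, -⟩ := pvMF_mem s w _ q hq
    exact_mod_cast by omega
  | case2 => exact List.Pairwise.nil

theorem pvOccScanEq (s w : List Char) (hw : w ≠ []) : ∀ (fuel a : Nat) (acc : List Int),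
    a ≤ s.length → s.length + 1 - a ≤ fuel →
    occScan_alt s w fuel (PySem.Chars.findFrom s w (↑a) none) acc = acc ++ pvMatchesFrom s w a := by
  intro fuel
  induction fuel with
  | zero => intro a acc h1 h2; omega
  | succ fuel ih =>
    intro a acc h1 h2
    rw [PySem.Chars.findFrom_natCast s w a h1]
    by_cases hf : PySem.Chars.find (s.drop a) w = -1
    · rw [if_pos hf]
      simp only [occScan_alt]
      rw [if_neg (by omega)]
      rw [pvMatchesFrom, dif_neg (by rw [hf]; simp), List.append_nil]
    · have hf0 : 0 ≤ PySem.Chars.find (s.drop a) w := by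
        have := PySem.Chars.neg_one_le_find (s.drop a) w
        omega
      rw [if_neg hf]
      have hple := pvFindDropNonneg s w a hf0 hw
      have hwlen : 1 ≤ w.length := by cases w with | nil => exact absurd rfl hw | cons x y => simp
      set f := (PySem.Chars.find (s.drop a) w).toNat with hfdef
      have hcast : (↑a + PySem.Chars.find (s.drop a) w : Int) = ((a + f : Nat) : Int) := by
        push_cast; omega
      rw [hcast]
      simp only [occScan_alt]
      rw [if_pos (show (0:Int) ≤ ((a + f : Nat) : Int) by positivity)]
      have hnext : ((a + f : Nat) : Int) + 1 = ((a + f + 1 : Nat) : Int) := by push_cast; ring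
      rw [hnext, ih (a + f + 1) (acc ++ [((a + f : Nat) : Int)]) (by omega) (by omega)]
      conv_rhs => rw [pvMatchesFrom]
      rw [dif_pos ⟨hf0, hw⟩, List.append_assoc, List.singleton_append]

def pvTarget (s w : List Char) (occ : List Int) (t : Nat) : Int :=
  if t < occ.length then (PySem.Chars.count (s.drop ((occ.getD t 0).toNat)) w : Int) else 0

-- the workhorse: a greedy count over a suffix is read off at the bisection point of occ
theorem pvCountBisect (s w : List Char) (hw : w ≠ []) (occ : List Int)
    (hlt : occ.Pairwise (· < ·))
    (hmem : ∀ q ∈ occ, ∃ p : Nat, q = ↑p ∧ w <+: s.drop p)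
    (hcomp : ∀ p : Nat, w <+: s.drop p → (↑p : Int) ∈ occ)
    (x : Nat) :
    (PySem.Chars.count (s.drop x) w : Int) = pvTarget s w occ (PySem.List.bisectLeft occ ↑x) := by
  have hso : occ.Pairwise (· ≤ ·) := hlt.imp (fun h => le_of_lt h)
  obtain ⟨hu1, hu2, hu3⟩ := PySem.List.bisectLeft_spec occ (↑x) hso
  set u := PySem.List.bisectLeft occ (↑x) with hudef
  by_cases hu : u < occ.length
  · -- occ[u] is the first match at or after x
    have hqu : occ.getD u 0 = occ[u] := List.getD_eq_getElem occ 0 hu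
    obtain ⟨p₀, hp₀, hmatch⟩ := hmem occ[u] (List.mem_of_getElem rfl)
    have hxle : (↑x : Int) ≤ occ[u] := hu3 u hu (le_refl u)
    have hxp₀ : x ≤ p₀ := by omega
    have hgd : occ.getD u 0 = (p₀ : Int) := hqu.trans hp₀
    unfold pvTarget
    rw [if_pos hu, hgd]
    simp only [Int.toNat_natCast]
    congr 1
    apply pvCountFirst s w hw x p₀ hmatch hxp₀
    intro p hxp hpp₀ hpref
    have hpocc := hcomp p hpref
    obtain ⟨j, hj, hjeq⟩ := List.mem_iff_getElem.mp hpocc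
    have hjlt : j < u := by
      rcases Nat.lt_trichotomy j u with h' | h' | h'
      · exact h'
      · exfalso
        subst h'
        rw [hjeq] at hp₀
        omega
      · exfalso
        have hmono := List.pairwise_iff_getElem.mp hlt u j hu hj h'
        rw [hjeq, hp₀] at hmono
        omega
    have := hu2 j hj hjlt
    rw [hjeq] at this
    omega
  · -- no match at or after x
    unfold pvTarget
    rw [if_neg hu]
    have : PySem.Chars.count (s.drop x) w = 0 := by
      apply pvCountNone s w hw x
      intro p hxp hpref
      obtain ⟨j, hj, hjeq⟩ := List.mem_iff_getElem.mp (hcomp p hpref)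
      have := hu2 j hj (by omega)
      rw [hjeq] at this
      omega
    rw [this]
    rfl

-- buildCnt fills cnt_at with the greedy counts, back to front
theorem pvBuildCnt (s w : List Char) (hw : w ≠ []) (occ : List Int)
    (hlt : occ.Pairwise (· < ·))
    (hmem : ∀ q ∈ occ, ∃ p : Nat, q = ↑p ∧ w <+: s.drop p)
    (hcomp : ∀ p : Nat, w <+: s.drop p → (↑p : Int) ∈ occ) :
    ∀ (t : Nat) (c : List Int), t ≤ occ.length → c.length = occ.length + 1 →
    (∀ u : Nat, t ≤ u → u ≤ occ.length → c.getD u 0 = pvTarget s w occ u) →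
    ∀ u : Nat, u ≤ occ.length →
      (buildCnt_alt occ w.length t c).getD u 0 = pvTarget s w occ u := by
  have hso : occ.Pairwise (· ≤ ·) := hlt.imp (fun h => le_of_lt h)
  intro t
  induction t with
  | zero => intro c _ _ hc u hu; exact hc u (by omega) hu
  | succ t ih =>
    intro c ht hlen hc u hu
    simp only [buildCnt_alt]
    -- the value written at index t
    have hqt : occ.getD t 0 = occ[t] := List.getD_eq_getElem occ 0 (by omega)
    obtain ⟨p, hpeq, hpm⟩ := hmem occ[t] (List.mem_of_getElem rfl)
    have hwlen : 1 ≤ w.length := by cases w with | nil => exact absurd rfl hw | cons a b => simp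
    set x : Int := occ.getD t 0 + (w.length : Int) with hxdef
    have hgd : occ.getD t 0 = (p : Int) := hqt.trans hpeq
    have hxcast : x = ((p + w.length : Nat) : Int) := by rw [hxdef, hgd]; push_cast; ring
    set u₀ := PySem.List.bisectLeft occ x with hu₀def
    obtain ⟨hb1, hb2, hb3⟩ := PySem.List.bisectLeft_spec occ x hso
    have htu₀ : t < u₀ := by
      by_contra hc'
      have h3 := hb3 t (by omega) (by omega)
      have h4 : x ≤ (p : Int) := le_of_le_of_eq h3 hpeq
      rw [hxcast] at h4
      push_cast at h4
      omega
    -- c is correct at u₀ (u₀ > t)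
    have hcu₀ : c.getD u₀ 0 = pvTarget s w occ u₀ := hc u₀ (by omega) hb1
    -- the greedy equation: count from occ[t] = 1 + count from p + |w|
    have hgreedy : (PySem.Chars.count (s.drop p) w : Int) = 1 + pvTarget s w occ u₀ := by
      have h1 : PySem.Chars.count (s.drop p) w =
          1 + PySem.Chars.count (s.drop (p + w.length)) w := by
        rw [pvCountUnroll w hw (s.drop p), pvFindPrefixZero _ w hpm, if_neg (by omega)]
        rw [List.drop_drop]
        norm_num
      rw [h1]
      have := pvCountBisect s w hw occ hlt hmem hcomp (p + w.length)
      rw [← hxcast] at this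
      rw [← hu₀def] at this
      push_cast
      omega
    apply ih (c.set t (1 + c.getD u₀ 0)) (by omega) (by simpa using hlen)
    · intro v htv hv
      by_cases hvt : v = t
      · rw [hvt]
        have htlen : t < (c.set t (1 + c.getD u₀ 0)).length := by rw [List.length_set]; omega
        rw [List.getD_eq_getElem _ 0 htlen, List.getElem_set_self (by simp; omega), hcu₀]
        have htarg : pvTarget s w occ t = (PySem.Chars.count (s.drop p) w : Int) := by
          rw [pvTarget, if_pos (by omega), hgd]
          simp only [Int.toNat_natCast]
        rw [htarg]
        omega
      · have hvlen : v < (c.set t (1 + c.getD u₀ 0)).length := by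
          rw [List.length_set]; omega
        rw [List.getD_eq_getElem _ 0 hvlen, List.getElem_set_ne (by omega) hvlen]
        rw [← List.getD_eq_getElem c 0 (by omega)]
        exact hc v (by omega) hv
    · exact hu

-- A's kmer expression agrees with B's (on the natural domain 0 ≤ k)
theorem pvKmerEq (s : List Char) (k : Int) (hk : 0 ≤ k) (i : Nat) :
    PySem.List.slice (s.drop i) none (some k) = kmerAt_alt s k i := by
  unfold kmerAt_alt
  rw [PySem.List.slice_to _ hk]
  conv_rhs => rw [show k = ((k.toNat : Nat) : Int) from by omega,
    PySem.List.slice_natCast_add]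

-- B's k-mers are nonempty within the string for 1 ≤ k
theorem pvKmerNe (s : List Char) (k : Int) (hk : 1 ≤ k) (i : Nat) (hi : i < s.length) :
    kmerAt_alt s k i ≠ [] := by
  unfold kmerAt_alt
  rw [show k = ((k.toNat : Nat) : Int) from by omega, PySem.List.slice_natCast_add]
  simp only [ne_eq, List.take_eq_nil_iff, List.drop_eq_nil_iff]
  omega

-- final cnt_at lookup produces the greedy count of the suffix
theorem pvGroupValue (s w : List Char) (hw : w ≠ []) (i : Nat) :
    (buildCnt_alt (pvMatchesFrom s w 0) w.length (pvMatchesFrom s w 0).length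
        (List.replicate ((pvMatchesFrom s w 0).length + 1) 0)).getD
      (PySem.List.bisectLeft (pvMatchesFrom s w 0) (↑i)) 0
      = (PySem.Chars.count (s.drop i) w : Int) := by
  set occ := pvMatchesFrom s w 0 with hoccdef
  have hlt := pvMF_sorted s w 0
  have hmem : ∀ q ∈ occ, ∃ p : Nat, q = ↑p ∧ w <+: s.drop p := by
    intro q hq
    obtain ⟨p, h1, _, h3⟩ := pvMF_mem s w 0 q hq
    exact ⟨p, h1, h3⟩
  have hcomp : ∀ p : Nat, w <+: s.drop p → (↑p : Int) ∈ occ :=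
    fun p hp => pvMF_complete s w hw 0 p (by omega) hp
  have hb := (PySem.List.bisectLeft_spec occ (↑i) (hlt.imp (fun h => le_of_lt h))).1
  rw [pvBuildCnt s w hw occ hlt hmem hcomp occ.length (List.replicate (occ.length + 1) 0)
      le_rfl (by simp) ?_ _ hb]
  · exact (pvCountBisect s w hw occ hlt hmem hcomp i).symm
  · intro u hu1 hu2
    have hu : u = occ.length := by omega
    rw [hu, pvTarget, if_neg (by omega)]
    rw [List.getD_eq_getElem _ 0 (by simp), List.getElem_replicate]

-- a fold of pointwise sets reads back pointwise
theorem pvSetFold (v : Nat → Int) : ∀ (qs : List Nat) (c : List Int) (j : Nat), j < c.length →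
    (qs.foldl (fun c i => c.set i (v i)) c).getD j 0 = if j ∈ qs then v j else c.getD j 0 := by
  intro qs
  induction qs with
  | nil => intro c j h; simp
  | cons i qs ih =>
    intro c j hj
    simp only [List.foldl_cons]
    rw [ih _ j (by simpa using hj)]
    by_cases hjq : j ∈ qs
    · rw [if_pos hjq, if_pos (List.mem_cons_of_mem i hjq)]
    · rw [if_neg hjq]
      by_cases hji : j = i
      · rw [hji, if_pos List.mem_cons_self]
        rw [List.getD_eq_getElem _ 0 (by simpa using by rw [← hji]; exact hj),
          List.getElem_set_self (by simp; rw [← hji]; exact hj)]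
      · rw [if_neg (by simp [hji, hjq])]
        rw [List.getD_eq_getElem _ 0 (by simpa using hj),
          List.getElem_set_ne (fun h => hji h.symm) (by simpa using hj),
          ← List.getD_eq_getElem c 0 hj]

theorem pvSetFoldLen (v : Nat → Int) : ∀ (qs : List Nat) (c : List Int),
    (qs.foldl (fun c i => c.set i (v i)) c).length = c.length := by
  intro qs
  induction qs with
  | nil => intro c; rfl
  | cons i qs ih => intro c; rw [List.foldl_cons, ih, List.length_set]

-- max over the deduplicated key list is the max over the original list
theorem pvMaxOfList (xs : List Int) (hne : xs ≠ []) :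
    PySem.List.max? (PySem.Set.ofList xs) (fun x => x) = PySem.List.max? xs (fun x => x) := by
  obtain ⟨x, hx⟩ := List.exists_mem_of_ne_nil xs hne
  have hne' : (PySem.Set.ofList xs : List Int) ≠ [] := by
    intro h
    have := (PySem.Set.mem_ofList xs x).mpr hx
    rw [h] at this
    exact absurd this (List.not_mem_nil)
  obtain ⟨m₁, hm₁⟩ : ∃ m, PySem.List.max? (PySem.Set.ofList xs) (fun x => x) = some m := by
    rcases h : PySem.List.max? (PySem.Set.ofList xs) (fun x => x) with _ | m
    · exact absurd ((PySem.List.max?_eq_none_iff _ _).mp h) hne'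
    · exact ⟨m, rfl⟩
  obtain ⟨m₂, hm₂⟩ : ∃ m, PySem.List.max? xs (fun x => x) = some m := by
    rcases h : PySem.List.max? xs (fun x => x) with _ | m
    · exact absurd ((PySem.List.max?_eq_none_iff _ _).mp h) hne
    · exact ⟨m, rfl⟩
  rw [hm₁, hm₂]
  have h1 : m₁ ∈ xs := (PySem.Set.mem_ofList xs m₁).mp (PySem.List.max?_mem hm₁)
  have h2 : m₂ ∈ PySem.Set.ofList xs := (PySem.Set.mem_ofList xs m₂).mpr (PySem.List.max?_mem hm₂)
  have le1 := PySem.List.max?_isMax hm₂ m₁ h1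
  have le2 := PySem.List.max?_isMax hm₁ m₂ h2
  exact congrArg some (le_antisymm le1 le2)

def pvCnts (s : List Char) (k : Int) (i : Nat) : Int :=
  (PySem.Chars.count (s.drop i) (kmerAt_alt s k i) : Int)

theorem pvOccEq (s w : List Char) (hw : w ≠ []) :
    occScan_alt s w (s.length + 1) (PySem.Chars.find s w) [] = pvMatchesFrom s w 0 := by
  have h := pvOccScanEq s w hw (s.length + 1) 0 [] (by omega) (by omega)
  rw [show ((0 : Nat) : Int) = (0 : Int) by norm_num, PySem.Chars.findFrom_zero] at h
  simpa using h

theorem pvCountsFold (s : List Char) (k : Int) :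
    ∀ (its : List (List Char × List Nat)) (c0 : List Int),
    c0.length = s.length →
    (∀ w qs, (w, qs) ∈ its →
      qs = (List.range s.length).filter (fun i => kmerAt_alt s k i == w)) →
    (∀ w qs, (w, qs) ∈ its → w ≠ []) →
    ∀ i, i < s.length →
    (its.foldl
      (fun counts wqs =>
        let occ := occScan_alt s wqs.1 (s.length + 1) (PySem.Chars.find s wqs.1) []
        let cntAt := buildCnt_alt occ wqs.1.length occ.length (List.replicate (occ.length + 1) 0)
        wqs.2.foldl (fun c i => c.set i (cntAt.getD (PySem.List.bisectLeft occ (i : Int)) 0))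
          counts)
      c0).getD i 0 =
      if kmerAt_alt s k i ∈ its.map Prod.fst then pvCnts s k i else c0.getD i 0 := by
  intro its
  induction its with
  | nil => intro c0 _ _ _ i _; simp
  | cons hd rest ih =>
    intro c0 hlen hqs hwne i hi
    obtain ⟨w, qs⟩ := hd
    have hqshd := hqs w qs List.mem_cons_self
    have hw0 : w ≠ [] := hwne w qs List.mem_cons_self
    rw [List.foldl_cons]
    dsimp only
    rw [ih _ (by rw [pvSetFoldLen]; exact hlen)
        (fun w' qs' hm => hqs w' qs' (List.mem_cons_of_mem _ hm))
        (fun w' qs' hm => hwne w' qs' (List.mem_cons_of_mem _ hm)) i hi]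
    by_cases hmem : kmerAt_alt s k i ∈ rest.map Prod.fst
    · rw [if_pos hmem, if_pos (by simp only [List.map_cons]; exact List.mem_cons_of_mem _ hmem)]
    · rw [if_neg hmem, pvSetFold _ qs c0 i (by omega)]
      by_cases hkw : kmerAt_alt s k i = w
      · rw [if_pos (by rw [hqshd, List.mem_filter]; exact ⟨List.mem_range.mpr hi, by simp [hkw]⟩)]
        rw [if_pos (by simp only [List.map_cons]; exact List.mem_cons.mpr (Or.inl hkw))]
        rw [pvOccEq s w hw0, pvGroupValue s w hw0 i, pvCnts, hkw]
      · have h1 : i ∉ qs := by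
          rw [hqshd, List.mem_filter]
          rintro ⟨-, hb⟩
          exact hkw (by simpa using hb)
        rw [if_neg h1]
        have h2 : kmerAt_alt s k i ∉ List.map Prod.fst ((w, qs) :: rest) := by
          simp only [List.map_cons, List.mem_cons]
          rintro (h | h)
          · exact hkw h
          · exact hmem h
        rw [if_neg h2]

theorem pvCountsFoldLen (s : List Char) :
    ∀ (its : List (List Char × List Nat)) (c0 : List Int),
    (its.foldl
      (fun counts wqs =>
        let occ := occScan_alt s wqs.1 (s.length + 1) (PySem.Chars.find s wqs.1) []
        let cntAt := buildCnt_alt occ wqs.1.length occ.length (List.replicate (occ.length + 1) 0)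
        wqs.2.foldl (fun c i => c.set i (cntAt.getD (PySem.List.bisectLeft occ (i : Int)) 0))
          counts)
      c0).length = c0.length := by
  intro its
  induction its with
  | nil => intro c0; rfl
  | cons hd rest ih =>
    intro c0
    rw [List.foldl_cons]
    dsimp only
    rw [ih, pvSetFoldLen]

-- the grouping fold reads back as a filter of the positions
theorem pvGroupsGetD (s : List Char) (k : Int) (w : List Char) :
    ((List.range s.length).foldl
        (fun d i => d.insert (kmerAt_alt s k i) (d.getD (kmerAt_alt s k i) [] ++ [i]))
        PySem.Dict.empty).getD w []
      = (List.range s.length).filter (fun i => kmerAt_alt s k i == w) := by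
  have h := PySem.Dict.getD_foldl_modify_append
    ((List.range s.length).map (fun i => (kmerAt_alt s k i, i))) PySem.Dict.empty w
  rw [List.foldl_map] at h
  simp only [PySem.Dict.modify] at h
  rw [h, PySem.Dict.getD_empty, List.nil_append, List.filter_map, List.map_map]
  simp [Function.comp_def]

theorem pvGroupsKeys (s : List Char) (k : Int) :
    ((List.range s.length).foldl
        (fun d i => d.insert (kmerAt_alt s k i) (d.getD (kmerAt_alt s k i) [] ++ [i]))
        PySem.Dict.empty).keys
      = PySem.Set.ofList ((List.range s.length).map (kmerAt_alt s k)) := by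
  rw [PySem.Dict.keys_foldl_insert_key (List.range s.length) (kmerAt_alt s k) _ PySem.Dict.empty,
    PySem.Dict.keys_empty, PySem.Set.update_nil_left]

-- A's frequency dictionary reads back as a filter of the positions
theorem pvDictAGetD (s : List Char) (k : Int) (c : Int) :
    ((List.range s.length).foldl
        (fun d i => d.insert (pvCnts s k i)
          (d.getD (pvCnts s k i) [] ++ [String.ofList (kmerAt_alt s k i)]))
        PySem.Dict.empty).getD c []
      = ((List.range s.length).filter (fun i => pvCnts s k i == c)).map
          (fun i => String.ofList (kmerAt_alt s k i)) := by
  have h := PySem.Dict.getD_foldl_modify_append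
    ((List.range s.length).map (fun i => (pvCnts s k i, String.ofList (kmerAt_alt s k i))))
    PySem.Dict.empty c
  rw [List.foldl_map] at h
  simp only [PySem.Dict.modify] at h
  rw [h, PySem.Dict.getD_empty, List.nil_append, List.filter_map, List.map_map]
  simp [Function.comp_def]

theorem pvDictAKeys (s : List Char) (k : Int) :
    ((List.range s.length).foldl
        (fun d i => d.insert (pvCnts s k i)
          (d.getD (pvCnts s k i) [] ++ [String.ofList (kmerAt_alt s k i)]))
        PySem.Dict.empty).keys
      = PySem.Set.ofList ((List.range s.length).map (pvCnts s k)) := by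
  rw [PySem.Dict.keys_foldl_insert_key (List.range s.length) (pvCnts s k) _ PySem.Dict.empty,
    PySem.Dict.keys_empty, PySem.Set.update_nil_left]

theorem pvMain (data : String) (k : Int) (hne : data.toList ≠ []) (hk : 1 ≤ k) :
    commonKmer data k = commonKmer_alt data k := by
  unfold commonKmer commonKmer_alt
  dsimp only
  set s := data.toList with hs
  have hn0 : 0 < s.length := List.length_pos_iff.mpr hne
  -- ===== A side =====
  rw [PySem.List.len_eq, PySem.List.pyRange_zero_natCast, List.foldl_map]
  rw [PySem.List.foldl_congr_mem (List.range s.length) _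
      (fun d i => d.insert (pvCnts s k i)
        (d.getD (pvCnts s k i) [] ++ [String.ofList (kmerAt_alt s k i)]))
      PySem.Dict.empty
      (by
        intro d i _
        dsimp only
        rw [PySem.List.slice_from_natCast, pvKmerEq s k (by omega) i]
        rfl)]
  rw [pvDictAKeys s k,
    pvMaxOfList _ (by simp only [ne_eq, List.map_eq_nil_iff, List.range_eq_nil]; omega)]
  -- ===== B side: the groups fold =====
  rw [PySem.List.foldl_congr_mem (List.range s.length) _
      (fun d i => d.insert (kmerAt_alt s k i) (d.getD (kmerAt_alt s k i) [] ++ [i]))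
      PySem.Dict.empty
      (by
        intro d i hi
        have hkm : ((List.range s.length).map (kmerAt_alt s k)).getD i [] = kmerAt_alt s k i := by
          simp [List.mem_range.mp hi]
        rw [hkm])]
  set groups := (List.range s.length).foldl
      (fun d i => d.insert (kmerAt_alt s k i) (d.getD (kmerAt_alt s k i) [] ++ [i]))
      PySem.Dict.empty with hgroups
  have hnodup : groups.keys.Nodup := by
    rw [hgroups]
    exact PySem.Dict.nodup_keys_foldl_insert_key _ (kmerAt_alt s k) _ _
      (by rw [PySem.Dict.keys_empty]; exact List.nodup_nil)
  have hqs : ∀ w qs, (w, qs) ∈ groups.items →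
      qs = (List.range s.length).filter (fun i => kmerAt_alt s k i == w) := by
    intro w qs hm
    have := PySem.Dict.getD_of_mem_items groups hm hnodup []
    rw [← this, hgroups, pvGroupsGetD]
  have hwne : ∀ w qs, (w, qs) ∈ groups.items → w ≠ [] := by
    intro w qs hm
    have hwk : w ∈ groups.keys := by
      have := List.mem_map_of_mem (f := Prod.fst) hm
      simpa [PySem.Dict.keys] using this
    rw [hgroups, pvGroupsKeys, PySem.Set.mem_ofList] at hwk
    obtain ⟨i, hi, rfl⟩ := List.mem_map.mp hwk
    exact pvKmerNe s k hk i (List.mem_range.mp hi)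
  have hkeysmem : ∀ i, i < s.length → kmerAt_alt s k i ∈ List.map Prod.fst groups.items := by
    intro i hi
    have : kmerAt_alt s k i ∈ groups.keys := by
      rw [hgroups, pvGroupsKeys, PySem.Set.mem_ofList]
      exact List.mem_map_of_mem (List.mem_range.mpr hi)
    simpa [PySem.Dict.keys] using this
  -- ===== B side: the counts list =====
  have hcounts : groups.items.foldl
      (fun counts wqs =>
        let occ := occScan_alt s wqs.1 (s.length + 1) (PySem.Chars.find s wqs.1) []
        let cntAt := buildCnt_alt occ wqs.1.length occ.length (List.replicate (occ.length + 1) 0)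
        wqs.2.foldl (fun c i => c.set i (cntAt.getD (PySem.List.bisectLeft occ (i : Int)) 0))
          counts)
      (List.replicate s.length 0)
      = (List.range s.length).map (pvCnts s k) := by
    apply List.ext_getElem
    · rw [pvCountsFoldLen, List.length_replicate, List.length_map, List.length_range]
    · intro i h1 h2
      have hi : i < s.length := by
        rw [pvCountsFoldLen, List.length_replicate] at h1
        exact h1
      rw [← List.getD_eq_getElem _ 0 h1, ← List.getD_eq_getElem _ 0 h2]
      rw [pvCountsFold s k groups.items (List.replicate s.length 0) (by simp) hqs hwne i hi]
      rw [if_pos (hkeysmem i hi)]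
      simp [hi]
  rw [hcounts]
  -- ===== the common selection =====
  cases hmax : PySem.List.max? ((List.range s.length).map (pvCnts s k)) (fun x => x) with
  | none => rfl
  | some best =>
    dsimp only
    rw [pvDictAGetD s k best]
    have hfilt : (List.range s.length).filter
        (fun i => decide (((List.range s.length).map (pvCnts s k)).getD i 0 = best))
        = (List.range s.length).filter (fun i => pvCnts s k i == best) := by
      apply List.filter_congr
      intro i hi
      have hlt := List.mem_range.mp hi
      have hg : ((List.range s.length).map (pvCnts s k)).getD i 0 = pvCnts s k i := by
        simp [hlt]
      rw [hg]
      rfl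
    rw [hfilt]
    apply List.map_congr_left
    intro i hi
    have hlt := List.mem_range.mp (List.mem_filter.mp hi).1
    simp [hlt]

-- ===== VERDICT (by name: the statement is the Claim_ definition above) =====
theorem commonKmer_spec : Claim_equal_commonKmer := by
  intro data k _ hpre
  unfold Spec_commonKmer
  exact pvMain data k (by intro h; exact hpre.1 (by
    cases data with | _ l => simp at h; simp [h])) hpre.2
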